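-- pv_equiv track=rewrite | github.com/Twodragon0/investing | scripts/collect_fmp_calendar.py | _build_economic_section
-- ===== SOURCE A (Python) =====
-- from typing import Any, Dict, List
--
-- _IMPACT_EMOJI = {
--     "High": "🔴",
--     "Medium": "🟡",
-- }
--
-- def _build_economic_section(events: List[Dict[str, Any]]) -> str:
--     """Build markdown table for economic calendar (High impact first)."""
--     if not events:
--         return ""
--
--     # Sort: High first, then Medium; within same impact sort by date
--     high = [e for e in events if e.get("impact") == "High"]
--     medium = [e for e in events if e.get("impact") == "Medium"]
--     sorted_events = sorted(high, key=lambda x: x.get("date", "")) + sorted(medium, key=lambda x: x.get("date", ""))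
--
--     lines = [
--         "## 📅 주요 경제 이벤트\n",
--         "| 날짜 | 국가 | 이벤트 | 중요도 | 예측 | 이전 | 실제 |",
--         "|------|------|--------|--------|------|------|------|",
--     ]
--     for e in sorted_events:
--         date = e.get("date", "")
--         country = e.get("country", "")
--         event = e.get("event", "")
--         impact = e.get("impact", "")
--         impact_display = f"{_IMPACT_EMOJI.get(impact, '')} {impact}"
--         forecast = e.get("forecast", "") or "-"
--         previous = e.get("previous", "") or "-"
--         actual = e.get("actual", "") or "-"
--         lines.append(f"| {date} | {country} | **{event}** | {impact_display} | {forecast} | {previous} | {actual} |")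
--
--     return "\n".join(lines) + "\n"
-- ===== SOURCE B (Python) =====
-- _IMPACT_EMOJI = {
--     "High": "\U0001F534",
--     "Medium": "\U0001F7E1",
-- }
--
-- def _row(e):
--     impact = e.get("impact", "")
--     forecast = e.get("forecast", "") or "-"
--     previous = e.get("previous", "") or "-"
--     actual = e.get("actual", "") or "-"
--     return (
--         f"| {e.get('date', '')} | {e.get('country', '')} | **{e.get('event', '')}** | "
--         f"{_IMPACT_EMOJI.get(impact, '')} {impact} | {forecast} | {previous} | {actual} |"
--     )
--
-- def _build_economic_section(events):
--     """Build markdown table for economic calendar (High impact first)."""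
--     if not events:
--         return ""
--     lines = [
--         "## \U0001F4C5 \uC8FC\uC694 \uACBD\uC81C \uC774\uBCA4\uD2B8\n",
--         "| \uB0A0\uC9DC | \uAD6D\uAC00 | \uC774\uBCA4\uD2B8 | \uC911\uC694\uB3C4 | \uC608\uCE21 | \uC774\uC804 | \uC2E4\uC81C |",
--         "|------|------|--------|--------|------|------|------|",
--     ]
--     # Bucket by date instead of sorting the events: for each impact class,
--     # group the events into a dict date -> [events in input order], then walk
--     # the distinct dates in sorted order; stability of A's sort makes this the
--     # same row order while only the distinct dates are ever sorted.
--     for impact in ("High", "Medium"):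
--         buckets = {}
--         for e in events:
--             if e.get("impact") == impact:
--                 buckets.setdefault(e.get("date", ""), []).append(e)
--         for d in sorted(buckets):
--             for e in buckets[d]:
--                 lines.append(_row(e))
--     return "\n".join(lines) + "\n"
-- ===== Notes on version B (the rewrite author's own statement) =====
-- stated objective: alternative
-- what changed: Replaces A's two filter+sort passes over the events with a group-by algorithm: for each impact class the events are bucketed into a dict keyed by date (input order kept inside each bucket) and only the distinct dates are sorted, then the buckets are emitted in that date order; stability of A's sort makes the row order identical.
import Mathlib
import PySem

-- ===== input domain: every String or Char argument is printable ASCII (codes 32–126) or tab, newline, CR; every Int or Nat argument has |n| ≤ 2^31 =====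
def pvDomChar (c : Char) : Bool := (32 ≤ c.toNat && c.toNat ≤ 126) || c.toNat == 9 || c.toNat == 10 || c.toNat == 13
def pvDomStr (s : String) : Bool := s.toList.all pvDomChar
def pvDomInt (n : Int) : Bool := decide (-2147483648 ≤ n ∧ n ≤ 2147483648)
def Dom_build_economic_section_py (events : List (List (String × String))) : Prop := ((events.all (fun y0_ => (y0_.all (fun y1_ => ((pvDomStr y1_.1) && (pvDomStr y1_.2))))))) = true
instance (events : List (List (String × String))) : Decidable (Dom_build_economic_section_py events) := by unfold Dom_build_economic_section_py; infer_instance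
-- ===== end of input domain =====

-- B buckets each impact class into a dict date -> events (input order) and sorts only the
-- distinct dates, instead of A's two stable sorts of the event lists (alternative algorithm, same rows).

-- ===== PORT A =====
def pvEmojiA : PySem.Dict String String := PySem.Dict.mk [("High", "🔴"), ("Medium", "🟡")]

def pvRowA (e : List (String × String)) : String :=
  let d := PySem.Dict.mk e
  let date := d.getD "date" ""
  let country := d.getD "country" ""
  let event := d.getD "event" ""
  let impact := d.getD "impact" ""
  let impact_display := pvEmojiA.getD impact "" ++ " " ++ impact
  let forecast := if d.getD "forecast" "" == "" then "-" else d.getD "forecast" ""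
  let previous := if d.getD "previous" "" == "" then "-" else d.getD "previous" ""
  let actual := if d.getD "actual" "" == "" then "-" else d.getD "actual" ""
  "| " ++ date ++ " | " ++ country ++ " | **" ++ event ++ "** | " ++ impact_display ++ " | "
    ++ forecast ++ " | " ++ previous ++ " | " ++ actual ++ " |"

def build_economic_section_py (events : List (List (String × String))) : String :=
  if events = [] then "" else
  let high := events.filter (fun e => (PySem.Dict.mk e).get? "impact" == some "High")
  let medium := events.filter (fun e => (PySem.Dict.mk e).get? "impact" == some "Medium")
  let sorted_events :=
    PySem.List.sorted high (fun x => (PySem.Dict.mk x).getD "date" "")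
      ++ PySem.List.sorted medium (fun x => (PySem.Dict.mk x).getD "date" "")
  let lines := ["## 📅 주요 경제 이벤트\n",
                "| 날짜 | 국가 | 이벤트 | 중요도 | 예측 | 이전 | 실제 |",
                "|------|------|--------|--------|------|------|------|"]
  let lines := sorted_events.foldl (fun acc e => acc ++ [pvRowA e]) lines
  PySem.Str.join "\n" lines ++ "\n"

-- ===== PORT B =====
def pvRowB (e : List (String × String)) : String :=
  let impact := (PySem.Dict.mk e).getD "impact" ""
  let forecast := if (PySem.Dict.mk e).getD "forecast" "" == "" then "-" else (PySem.Dict.mk e).getD "forecast" ""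
  let previous := if (PySem.Dict.mk e).getD "previous" "" == "" then "-" else (PySem.Dict.mk e).getD "previous" ""
  let actual := if (PySem.Dict.mk e).getD "actual" "" == "" then "-" else (PySem.Dict.mk e).getD "actual" ""
  "| " ++ (PySem.Dict.mk e).getD "date" "" ++ " | " ++ (PySem.Dict.mk e).getD "country" ""
    ++ " | **" ++ (PySem.Dict.mk e).getD "event" "" ++ "** | "
    ++ (PySem.Dict.mk [("High", "🔴"), ("Medium", "🟡")]).getD impact "" ++ " " ++ impact ++ " | "
    ++ forecast ++ " | " ++ previous ++ " | " ++ actual ++ " |"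

-- 'buckets.setdefault(e.get("date",""), []).append(e)' under the filter of the inner loop
def pvBuckets (events : List (List (String × String))) (impact : String) :
    PySem.Dict String (List (List (String × String))) :=
  events.foldl (fun d e =>
    if (PySem.Dict.mk e).get? "impact" == some impact then
      d.modify ((PySem.Dict.mk e).getD "date" "") [] (· ++ [e])
    else d) PySem.Dict.empty

-- one iteration of 'for impact in ("High", "Medium")'
def pvImpactLines (events : List (List (String × String))) (lines : List String) (impact : String) :
    List String :=
  let buckets := pvBuckets events impact
  (PySem.List.sorted buckets.keys (fun k => k) false).foldl
    (fun acc d2 => (buckets.getD d2 []).foldl (fun a e => a ++ [pvRowB e]) acc) lines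

def build_economic_section_py_alt (events : List (List (String × String))) : String :=
  if events = [] then "" else
  let lines := ["## 📅 주요 경제 이벤트\n",
                "| 날짜 | 국가 | 이벤트 | 중요도 | 예측 | 이전 | 실제 |",
                "|------|------|--------|--------|------|------|------|"]
  let lines := ["High", "Medium"].foldl (pvImpactLines events) lines
  PySem.Str.join "\n" lines ++ "\n"

-- ===== PRECONDITION & SPEC =====
def Spec_build_economic_section_py (events : List (List (String × String))) (out : String) : Prop := out = build_economic_section_py_alt events
instance (events : List (List (String × String))) (out : String) : Decidable (Spec_build_economic_section_py events out) := by unfold Spec_build_economic_section_py; infer_instance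

-- ===== CLAIM (what is proved, stated in full; the proofs are below) =====
def Claim_equal_build_economic_section_py : Prop := ∀ (events : List (List (String × String))), Dom_build_economic_section_py events → Spec_build_economic_section_py events (build_economic_section_py events)

-- ===== LEMMAS AND PROOFS =====

-- the group of key k: events of xs whose key is k, in input order
def pvGrp {α : Type} (key : α → String) (xs : List α) (k : String) : List α :=
  xs.filter (fun x => key x == k)

lemma pvGrp_key {α : Type} (key : α → String) (xs : List α) (k : String) :
    ∀ y ∈ pvGrp key xs k, key y = k := by
  intro y hy
  have := List.of_mem_filter hy
  exact eq_of_beq this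

lemma pvGrp_ne_nil {α : Type} (key : α → String) (xs : List α) (k : String)
    (h : k ∈ xs.map key) : pvGrp key xs k ≠ [] := by
  rcases List.mem_map.mp h with ⟨x, hx, hk⟩
  have : x ∈ pvGrp key xs k := List.mem_filter.mpr ⟨hx, by simp [hk]⟩
  intro hnil; rw [hnil] at this; exact List.not_mem_nil this

lemma pvGrp_eq_nil {α : Type} (key : α → String) (xs : List α) (k : String)
    (h : k ∉ xs.map key) : pvGrp key xs k = [] := by
  refine List.filter_eq_nil_iff.mpr ?_
  intro x hx hb
  exact h (List.mem_map.mpr ⟨x, hx, eq_of_beq hb⟩)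

lemma pvGrp_append_singleton {α : Type} (key : α → String) (xs : List α) (x : α) (k : String) :
    pvGrp key (xs ++ [x]) k = pvGrp key xs k ++ (if key x == k then [x] else []) := by
  simp only [pvGrp, List.filter_append, List.filter_cons, List.filter_nil]

lemma insertBy_append_of_forall_false {α : Type} (before : α → α → Bool) (x : α)
    (L1 L2 : List α) (h : ∀ y ∈ L1, before x y = false) :
    PySem.List.insertBy before x (L1 ++ L2) = L1 ++ PySem.List.insertBy before x L2 := by
  induction L1 with
  | nil => rfl
  | cons y ys ih =>
    rw [List.cons_append, PySem.List.insertBy, h y (by simp)]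
    rw [if_neg (by simp), ih (fun z hz => h z (by simp [hz])), List.cons_append]

-- inserting x in front of groups whose keys all exceed key x
lemma pvInsert_front {α : Type} (key : α → String) (x : α) (xs : List α) (ks : List String)
    (hgt : ∀ k ∈ ks, key x < k) (hne : ∀ k ∈ ks, pvGrp key xs k ≠ []) :
    PySem.List.insertBy (fun a b => decide (key a < key b)) x (ks.flatMap (pvGrp key xs))
      = x :: ks.flatMap (pvGrp key xs) := by
  cases ks with
  | nil => rfl
  | cons k t =>
    have hk := hgt k (by simp)
    obtain ⟨z, zs, hz⟩ := List.exists_cons_of_ne_nil (hne k (by simp))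
    have hkey : key z = k := pvGrp_key key xs k z (by rw [hz]; simp)
    simp only [List.flatMap_cons, hz, List.cons_append, PySem.List.insertBy]
    rw [if_pos (by rw [hkey]; exact decide_eq_true hk)]

-- inserting x when its key is already one of the (strictly increasing) keys:
-- x goes to the end of its own group, the key list is unchanged
lemma pvInsert_mem {α : Type} (key : α → String) (x : α) (xs : List α) :
    ∀ ks : List String, ks.Pairwise (· < ·) → (∀ k ∈ ks, pvGrp key xs k ≠ []) → key x ∈ ks →
    PySem.List.insertBy (fun a b => decide (key a < key b)) x (ks.flatMap (pvGrp key xs))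
      = ks.flatMap (pvGrp key (xs ++ [x])) := by
  intro ks
  induction ks with
  | nil => intro _ _ h; exact absurd h (List.not_mem_nil)
  | cons k t ih =>
    intro hp hne hmem
    have hpass : ∀ y ∈ pvGrp key xs k, decide (key x < key y) = false := by
      intro y hy
      rw [pvGrp_key key xs k y hy]
      rcases List.mem_cons.mp hmem with h | h
      · rw [h]; exact decide_eq_false (lt_irrefl k)
      · exact decide_eq_false (not_lt.mpr (le_of_lt ((List.pairwise_cons.mp hp).1 _ h)))
    rcases List.mem_cons.mp hmem with heq | hmem'
    · -- key x = k : x appended to this group, later groups untouched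
      simp only [List.flatMap_cons]
      rw [insertBy_append_of_forall_false _ x _ _ hpass]
      have hgt : ∀ k' ∈ t, key x < k' := by
        intro k' hk'; rw [heq]; exact (List.pairwise_cons.mp hp).1 _ hk'
      rw [pvInsert_front key x xs t hgt (fun k' hk' => hne k' (by simp [hk']))]
      have ht : t.flatMap (pvGrp key (xs ++ [x])) = t.flatMap (pvGrp key xs) := by
        refine List.flatMap_congr ?_
        intro k' hk'
        rw [pvGrp_append_singleton, beq_eq_false_iff_ne.mpr (ne_of_lt (hgt k' hk'))]
        simp
      rw [ht, pvGrp_append_singleton, heq, if_pos (by simp)]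
      simp
    · -- key x in the tail
      simp only [List.flatMap_cons]
      rw [insertBy_append_of_forall_false _ x _ _ hpass]
      rw [ih (List.pairwise_cons.mp hp).2 (fun k' hk' => hne k' (by simp [hk'])) hmem']
      have : pvGrp key (xs ++ [x]) k = pvGrp key xs k := by
        rw [pvGrp_append_singleton,
            beq_eq_false_iff_ne.mpr (ne_of_gt ((List.pairwise_cons.mp hp).1 _ hmem'))]
        simp
      rw [this]

-- inserting x when its key is new: the key is inserted into the key list,
-- x forms its own (new) group
lemma pvInsert_not_mem {α : Type} (key : α → String) (x : α) (xs : List α) :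
    ∀ ks : List String, ks.Pairwise (· < ·) → (∀ k ∈ ks, pvGrp key xs k ≠ []) →
    key x ∉ ks → pvGrp key xs (key x) = [] →
    PySem.List.insertBy (fun a b => decide (key a < key b)) x (ks.flatMap (pvGrp key xs))
      = (PySem.List.insertBy (fun a b => decide (a < b)) (key x) ks).flatMap
          (pvGrp key (xs ++ [x])) := by
  intro ks
  induction ks with
  | nil =>
    intro _ _ _ hnil
    simp only [List.flatMap_nil, PySem.List.insertBy, List.flatMap_cons, List.flatMap_nil]
    rw [pvGrp_append_singleton, hnil, if_pos (by simp)]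
    simp
  | cons k t ih =>
    intro hp hne hnm hnil
    have hxk : key x ≠ k := by intro h; exact hnm (by simp [h])
    by_cases hlt : key x < k
    · -- new key goes in front
      rw [PySem.List.insertBy, if_pos (decide_eq_true hlt)]
      obtain ⟨z, zs, hz⟩ := List.exists_cons_of_ne_nil (hne k (by simp))
      have hkey : key z = k := pvGrp_key key xs k z (by rw [hz]; simp)
      simp only [List.flatMap_cons, hz, List.cons_append, PySem.List.insertBy]
      rw [if_pos (by rw [hkey]; exact decide_eq_true hlt)]
      rw [pvGrp_append_singleton, hnil, if_pos (by simp)]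
      have hall : ∀ k' ∈ k :: t, pvGrp key (xs ++ [x]) k' = pvGrp key xs k' := by
        intro k' hk'
        rw [pvGrp_append_singleton,
            beq_eq_false_iff_ne.mpr (fun h => hnm (by rw [h]; exact hk'))]
        simp
      rw [hall k (by simp),
          List.flatMap_congr (fun k' hk' => hall k' (List.mem_cons_of_mem _ hk'))]
      simp [hz]
    · -- key x > k : pass this group
      have hgt : k < key x := lt_of_le_of_ne (le_of_not_gt hlt) (Ne.symm hxk)
      have hpass : ∀ y ∈ pvGrp key xs k, decide (key x < key y) = false := by
        intro y hy
        rw [pvGrp_key key xs k y hy]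
        exact decide_eq_false (not_lt.mpr (le_of_lt hgt))
      simp only [List.flatMap_cons]
      rw [insertBy_append_of_forall_false _ x _ _ hpass]
      rw [ih (List.pairwise_cons.mp hp).2 (fun k' hk' => hne k' (by simp [hk']))
            (fun h => hnm (by simp [h])) hnil]
      rw [PySem.List.insertBy, if_neg (by simp [hlt])]
      simp only [List.flatMap_cons]
      rw [show pvGrp key (xs ++ [x]) k = pvGrp key xs k by
            rw [pvGrp_append_singleton, beq_eq_false_iff_ne.mpr hxk]; simp]

-- MAIN: a stable sort by key is the concatenation, over the sorted distinct keys,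
-- of the groups in input order
lemma pvSorted_eq_flatMap {α : Type} (key : α → String) (xs : List α) :
    PySem.List.sorted xs key false
      = (PySem.List.sorted (PySem.Set.ofList (xs.map key)) (fun k => k) false).flatMap
          (pvGrp key xs) := by
  induction xs using List.reverseRecOn with
  | nil => rfl
  | append_singleton xs x ih =>
    have hL : PySem.List.sorted (xs ++ [x]) key false
        = PySem.List.insertBy (fun a b => decide (key a < key b)) x
            (PySem.List.sorted xs key false) := by
      rw [PySem.List.sorted_eq_foldl_insertBy, PySem.List.sorted_eq_foldl_insertBy,
          List.foldl_append]
      rfl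
    have hmap : (xs ++ [x]).map key = xs.map key ++ [key x] := by simp
    have hpw : (PySem.List.sorted (PySem.Set.ofList (xs.map key)) (fun k => k) false).Pairwise
        (· < ·) := PySem.List.sorted_ofList_pairwise_lt (xs.map key)
    have hmemks : ∀ k, k ∈ PySem.List.sorted (PySem.Set.ofList (xs.map key)) (fun k => k) false
        ↔ k ∈ xs.map key := by
      intro k
      rw [PySem.List.mem_sorted, PySem.Set.mem_ofList]
    have hne : ∀ k ∈ PySem.List.sorted (PySem.Set.ofList (xs.map key)) (fun k => k) false,
        pvGrp key xs k ≠ [] := fun k hk => pvGrp_ne_nil key xs k ((hmemks k).mp hk)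
    rw [hL, ih, hmap]
    by_cases hmem : key x ∈ xs.map key
    · rw [PySem.Set.ofList_append_singleton,
          PySem.Set.add_of_mem ((PySem.Set.mem_ofList _ _).mpr hmem)]
      exact pvInsert_mem key x xs _ hpw hne ((hmemks _).mpr hmem)
    · rw [PySem.Set.ofList_append_singleton,
          PySem.Set.add_of_not_mem (fun h => hmem ((PySem.Set.mem_ofList _ _).mp h))]
      have hsorted : PySem.List.sorted (PySem.Set.ofList (xs.map key) ++ [key x])
            (fun k => k) false
          = PySem.List.insertBy (fun a b => decide (a < b)) (key x)
              (PySem.List.sorted (PySem.Set.ofList (xs.map key)) (fun k => k) false) := by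
        rw [PySem.List.sorted_eq_foldl_insertBy, PySem.List.sorted_eq_foldl_insertBy,
            List.foldl_append]
        rfl
      rw [hsorted]
      exact pvInsert_not_mem key x xs _ hpw hne
        (fun h => hmem ((hmemks _).mp h)) (pvGrp_eq_nil key xs _ hmem)

-- the bucket dict of one impact class: lookup gives the group of a date, keys are the distinct dates
lemma pvBuckets_getD (events : List (List (String × String))) (impact : String) (k : String) :
    (pvBuckets events impact).getD k []
      = pvGrp (fun e => (PySem.Dict.mk e).getD "date" "")
          (events.filter (fun e => (PySem.Dict.mk e).get? "impact" == some impact)) k := by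
  unfold pvBuckets
  rw [← List.foldl_filter]
  have h := PySem.Dict.getD_foldl_modify_append
    ((events.filter (fun e => (PySem.Dict.mk e).get? "impact" == some impact)).map
      (fun e => ((PySem.Dict.mk e).getD "date" "", e)))
    PySem.Dict.empty k
  rw [List.foldl_map] at h
  rw [h]
  simp [pvGrp, List.filter_map, Function.comp_def]

lemma pvBuckets_keys (events : List (List (String × String))) (impact : String) :
    (pvBuckets events impact).keys
      = PySem.Set.ofList
          ((events.filter (fun e => (PySem.Dict.mk e).get? "impact" == some impact)).map
            (fun e => (PySem.Dict.mk e).getD "date" "")) := by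
  unfold pvBuckets
  rw [← List.foldl_filter]
  have h := PySem.Dict.keys_foldl_modify_key
    (events.filter (fun e => (PySem.Dict.mk e).get? "impact" == some impact))
    (fun e => (PySem.Dict.mk e).getD "date" "") [] (fun _ e => (· ++ [e])) PySem.Dict.empty
  simpa [PySem.Set.update_nil_left] using h

lemma pvRow_eq : pvRowA = pvRowB := by
  funext e
  simp only [pvRowA, pvRowB, pvEmojiA, String.append_assoc]

-- one impact iteration of B emits exactly the rows A emits for that impact class
lemma pvImpactLines_eq (events : List (List (String × String))) (lines : List String)
    (impact : String) :
    pvImpactLines events lines impact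
      = lines ++ (PySem.List.sorted
          (events.filter (fun e => (PySem.Dict.mk e).get? "impact" == some impact))
          (fun x => (PySem.Dict.mk x).getD "date" "") false).map pvRowB := by
  unfold pvImpactLines
  simp only [pvBuckets_getD, pvBuckets_keys, PySem.List.foldl_append_singleton_eq_map,
    PySem.List.foldl_append_eq_flatMap]
  rw [pvSorted_eq_flatMap (fun x => (PySem.Dict.mk x).getD "date" ""), List.map_flatMap]

-- ===== VERDICT (by name: the statement is the Claim_ definition above) =====
theorem build_economic_section_py_spec : Claim_equal_build_economic_section_py := by
  intro events _
  unfold Spec_build_economic_section_py build_economic_section_py build_economic_section_py_alt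
  by_cases hne : events = []
  · simp [hne]
  · simp only [if_neg hne]
    rw [PySem.List.foldl_append_singleton_eq_map]
    simp only [List.foldl_cons, List.foldl_nil, pvImpactLines_eq]
    rw [pvRow_eq]
    simp
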